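-- pv_equiv track=rewrite | github.com/ksuwa55/CrossTeamsAI | app/cli_runner.py | keyword_prefilter
-- ===== SOURCE A (Python) =====
-- def keyword_prefilter(transcript: str, query: str, window: int = 2) -> str:
--     """Keep lines containing any query token (+/- window neighbors). Falls back if too small."""
--     lines = transcript.splitlines()
--     toks = [t for t in query.lower().split() if len(t) > 2]
--     if not toks or not lines:
--         return transcript
--     keep = [False] * len(lines)
--     for i, ln in enumerate(lines):
--         low = ln.lower()
--         if any(t in low for t in toks):
--             for j in range(max(0, i - window), min(len(lines), i + window + 1)):
--                 keep[j] = True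
--     kept = [l for l, k in zip(lines, keep) if k]
--     if len(kept) < max(60, len(lines) // 12):
--         return transcript
--     return "\n".join(kept)
-- ===== SOURCE B (Python) =====
-- def keyword_prefilter(transcript: str, query: str, window: int = 2) -> str:
--     """Keep lines within `window` of a line containing any query token; fall back if too few."""
--     lines = transcript.splitlines()
--     toks = [t for t in query.lower().split() if len(t) > 2]
--     if not toks or not lines:
--         return transcript
--     matches = [i for i, ln in enumerate(lines) if any(t in ln.lower() for t in toks)]
--     kept = []
--     p = 0
--     for i, ln in enumerate(lines):
--         while p < len(matches) and matches[p] < i - window: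
--             p += 1
--         if p < len(matches) and matches[p] <= i + window:
--             kept.append(ln)
--     if len(kept) < max(60, len(lines) // 12):
--         return transcript
--     return "\n".join(kept)
-- ===== Notes on version B (the rewrite author's own statement) =====
-- stated objective: alternative
-- what changed: A scatters: for every matching line it marks a boolean window around it in a keep-array and then zips; B gathers: it collects the sorted match indices in one pass and does a single two-pointer sweep keeping each line whose nearest match index is within the window.
import Mathlib
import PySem

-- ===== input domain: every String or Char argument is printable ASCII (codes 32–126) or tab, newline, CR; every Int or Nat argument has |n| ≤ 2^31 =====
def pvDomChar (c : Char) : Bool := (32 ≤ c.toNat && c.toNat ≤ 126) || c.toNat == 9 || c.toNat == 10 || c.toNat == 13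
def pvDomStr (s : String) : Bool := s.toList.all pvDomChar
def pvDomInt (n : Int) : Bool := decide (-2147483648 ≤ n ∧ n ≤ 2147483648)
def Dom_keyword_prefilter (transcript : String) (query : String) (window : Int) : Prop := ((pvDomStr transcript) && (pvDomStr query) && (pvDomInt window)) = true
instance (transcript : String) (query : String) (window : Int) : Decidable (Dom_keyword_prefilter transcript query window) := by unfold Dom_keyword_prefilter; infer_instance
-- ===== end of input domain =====

-- B replaces A's scatter (mark a window of booleans around every matching line) by a
-- gather: one pass collecting match indices, then a two-pointer sweep keeping each line
-- whose nearest match is within the window (objective: alternative decomposition).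

-- ===== PORT A =====
def keyword_prefilter (transcript : String) (query : String) (window : Int) : String :=
  let lines := PySem.Str.splitlines transcript
  let toks := (PySem.Str.split₀ (PySem.Str.lower query)).filter (fun t => 2 < PySem.Str.len t)
  if toks = [] ∨ lines = [] then transcript
  else
    let keep : List Bool := List.replicate lines.length false
    let keep := (PySem.List.enumerate lines 0).foldl (fun keep p =>
      let low := PySem.Str.lower p.2
      if toks.any (fun t => PySem.Str.isIn t low) then
        -- range starts at max 0 _, so the index is nonnegative and .toNat is exact
        (PySem.List.pyRange (max 0 (p.1 - window)) (min (lines.length : Int) (p.1 + window + 1)) 1).foldl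
          (fun ks j => ks.set j.toNat true) keep
      else keep) keep
    let kept := ((lines.zip keep).filter (fun lk => lk.2)).map (fun lk => lk.1)
    if (kept.length : Int) < max 60 (PySem.Int.floordiv (lines.length : Int) 12) then transcript
    else PySem.Str.join "\n" kept

-- ===== PORT B =====
-- the `while p < len(ms) and ms[p] < i - window: p += 1` loop of Source B
def pvAdvance (ms : List Int) (bound : Int) (p : Nat) : Nat :=
  if p < ms.length then
    if ms.getD p 0 < bound then pvAdvance ms bound (p + 1) else p
  else p
termination_by ms.length - p

def keyword_prefilter_alt (transcript : String) (query : String) (window : Int) : String :=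
  let lines := PySem.Str.splitlines transcript
  let toks := (PySem.Str.split₀ (PySem.Str.lower query)).filter (fun t => 2 < PySem.Str.len t)
  if toks = [] ∨ lines = [] then transcript
  else
    let ms := ((PySem.List.enumerate lines 0).filter
        (fun p => toks.any (fun t => PySem.Str.isIn t (PySem.Str.lower p.2)))).map (fun p => p.1)
    -- ms[p] is only read under the guard p < len(ms), so getD's default is never used
    let st := (PySem.List.enumerate lines 0).foldl (fun (st : Nat × List String) p =>
      let q := pvAdvance ms (p.1 - window) st.1
      if decide (q < ms.length) && decide (ms.getD q 0 ≤ p.1 + window) then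
        (q, st.2 ++ [p.2])
      else (q, st.2)) (0, [])
    let kept := st.2
    if (kept.length : Int) < max 60 (PySem.Int.floordiv (lines.length : Int) 12) then transcript
    else PySem.Str.join "\n" kept

-- ===== PRECONDITION & SPEC =====
def Spec_keyword_prefilter (transcript : String) (query : String) (window : Int) (out : String) : Prop := out = keyword_prefilter_alt transcript query window
instance (transcript : String) (query : String) (window : Int) (out : String) : Decidable (Spec_keyword_prefilter transcript query window out) := by unfold Spec_keyword_prefilter; infer_instance

-- ===== CLAIM (what is proved, stated in full; the proofs are below) =====
def Claim_equal_keyword_prefilter : Prop := ∀ (transcript : String) (query : String) (window : Int), Dom_keyword_prefilter transcript query window → Spec_keyword_prefilter transcript query window (keyword_prefilter transcript query window)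

-- ===== LEMMAS AND PROOFS =====

theorem pv_mark_aux (n : Nat) : ∀ (b a : Int) (ks : List Bool), (b - a).toNat = n → 0 ≤ a →
    ((PySem.List.pyRange a b 1).foldl (fun ks j => ks.set j.toNat true) ks).length = ks.length ∧
    ∀ q : Nat, ((PySem.List.pyRange a b 1).foldl (fun ks j => ks.set j.toNat true) ks).getD q false
      = (ks.getD q false || (decide (a ≤ (q : Int)) && decide ((q : Int) < b) && decide (q < ks.length))) := by
  induction n with
  | zero =>
    intro b a ks hn ha
    rw [PySem.List.pyRange_one_eq_nil (by omega)]
    simp only [List.foldl_nil]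
    refine ⟨trivial, fun q => ?_⟩
    have : ¬ ((a ≤ (q : Int)) ∧ ((q : Int) < b)) := by omega
    by_cases h1 : a ≤ (q : Int) <;> by_cases h2 : (q : Int) < b <;> simp_all
  | succ n ih =>
    intro b a ks hn ha
    rw [PySem.List.pyRange_one_cons (by omega)]
    simp only [List.foldl_cons]
    obtain ⟨hlen, hget⟩ := ih b (a + 1) (ks.set a.toNat true) (by omega) (by omega)
    refine ⟨by rw [hlen]; simp, fun q => ?_⟩
    rw [hget q]
    simp only [List.length_set]
    rw [List.getD_eq_getElem?_getD, List.getElem?_set, List.getD_eq_getElem?_getD]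
    by_cases hq : a.toNat = q
    · subst hq
      have hqa : (a.toNat : Int) = a := by omega
      by_cases hl : a.toNat < ks.length
      · simp [hl, hqa]
        right; omega
      · simp [hl, hqa]
    · have hqa : ¬ ((a : Int) ≤ (q:Int) ∧ (q:Int) < a + 1) := by omega
      simp only [if_neg hq]
      rw [← List.getD_eq_getElem?_getD]
      by_cases h1 : a + 1 ≤ (q : Int)
      · have : a ≤ (q:Int) := by omega
        simp [h1, this]
      · have h2 : ¬ (a ≤ (q:Int)) := by omega
        simp [h1, h2]

theorem pv_keepA (window nI : Int) (f : String → Bool) :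
    ∀ (L : List (Int × String)) (ks : List Bool),
    (L.foldl (fun keep p =>
      if f p.2 then
        (PySem.List.pyRange (max 0 (p.1 - window)) (min nI (p.1 + window + 1)) 1).foldl
          (fun ks j => ks.set j.toNat true) keep
      else keep) ks).length = ks.length ∧
    ∀ q : Nat, (L.foldl (fun keep p =>
      if f p.2 then
        (PySem.List.pyRange (max 0 (p.1 - window)) (min nI (p.1 + window + 1)) 1).foldl
          (fun ks j => ks.set j.toNat true) keep
      else keep) ks).getD q false
      = (ks.getD q false || L.any (fun p => f p.2 &&
          (decide (max 0 (p.1 - window) ≤ (q : Int)) && decide ((q : Int) < min nI (p.1 + window + 1)) && decide (q < ks.length)))) := by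
  intro L
  induction L with
  | nil => intro ks; simp
  | cons x L ih =>
    intro ks
    simp only [List.foldl_cons, List.any_cons]
    by_cases hf : f x.2
    · obtain ⟨hlen1, hget1⟩ := pv_mark_aux ((min nI (x.1 + window + 1)) - (max 0 (x.1 - window))).toNat
        (min nI (x.1 + window + 1)) (max 0 (x.1 - window)) ks rfl (le_max_left 0 _)
      obtain ⟨hlen2, hget2⟩ := ih ((PySem.List.pyRange (max 0 (x.1 - window)) (min nI (x.1 + window + 1)) 1).foldl
          (fun ks j => ks.set j.toNat true) ks)
      rw [if_pos hf]
      refine ⟨by rw [hlen2, hlen1], fun q => ?_⟩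
      rw [hget2 q, hget1 q, hlen1, hf]
      simp [Bool.or_assoc]
    · rw [if_neg hf]
      obtain ⟨hlen2, hget2⟩ := ih ks
      refine ⟨hlen2, fun q => ?_⟩
      rw [hget2 q]
      simp [hf]

theorem pv_zip_bridge : ∀ (ls : List String) (keep : List Bool) (s : Int),
    keep.length = ls.length →
    ((ls.zip keep).filter (fun lk => lk.2)).map (fun lk => lk.1)
      = ((PySem.List.enumerate ls s).filter (fun p => keep.getD (p.1 - s).toNat false)).map (fun p => p.2) := by
  intro ls
  induction ls with
  | nil => intro keep s h; simp [PySem.List.enumerate_nil]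
  | cons x xs ih =>
    intro keep s h
    match keep with
    | k :: kt =>
      rw [PySem.List.enumerate_cons]
      have hh : ((k :: kt).getD (((s : Int), x).1 - s).toNat false) = k := by simp
      have htail : ((PySem.List.enumerate xs (s+1)).filter (fun p => (k :: kt).getD (p.1 - s).toNat false))
          = ((PySem.List.enumerate xs (s+1)).filter (fun p => kt.getD (p.1 - (s+1)).toNat false)) := by
        apply List.filter_congr
        intro p hp
        rw [PySem.List.mem_enumerate_iff] at hp
        obtain ⟨j, hj, rfl⟩ := hp
        have h1 : ((s + 1 + (j:Int), xs[j]).1 - s).toNat = ((s + 1 + (j:Int), xs[j]).1 - (s+1)).toNat + 1 := by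
          simp; omega
        rw [h1, List.getD_cons_succ]
      have hrec := ih kt (s+1) (by simpa using h)
      rw [List.zip_cons_cons, List.filter_cons, List.filter_cons, hh, htail]
      cases k <;> simp [hrec]

theorem pv_advance_aux (ms : List Int) (bound : Int) : ∀ (fuel p : Nat), ms.length - p ≤ fuel →
    (∀ k, k < p → k < ms.length → ms.getD k 0 < bound) →
    p ≤ pvAdvance ms bound p ∧
    (∀ k, k < pvAdvance ms bound p → k < ms.length → ms.getD k 0 < bound) ∧
    (pvAdvance ms bound p < ms.length → ¬ ms.getD (pvAdvance ms bound p) 0 < bound) := by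
  intro fuel
  induction fuel with
  | zero =>
    intro p hf hp
    have hge : ¬ p < ms.length := by omega
    rw [pvAdvance, if_neg hge]
    exact ⟨le_refl _, hp, fun h => absurd h hge⟩
  | succ fuel ih =>
    intro p hf hp
    by_cases hlt : p < ms.length
    · by_cases hb : ms.getD p 0 < bound
      · rw [pvAdvance, if_pos hlt, if_pos hb]
        have step : ∀ k, k < p + 1 → k < ms.length → ms.getD k 0 < bound := by
          intro k hk hk2
          rcases Nat.lt_succ_iff_lt_or_eq.mp hk with h | h
          · exact hp k h hk2
          · subst h; exact hb
        obtain ⟨h1, h2, h3⟩ := ih (p+1) (by omega) step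
        exact ⟨by omega, h2, h3⟩
      · rw [pvAdvance, if_pos hlt, if_neg hb]
        exact ⟨le_refl _, hp, fun _ => hb⟩
    · rw [pvAdvance, if_neg hlt]
      exact ⟨le_refl _, hp, fun h => absurd h hlt⟩

theorem pv_advance_spec (ms : List Int) (bound : Int) (p : Nat)
    (hp : ∀ k, k < p → k < ms.length → ms.getD k 0 < bound) :
    p ≤ pvAdvance ms bound p ∧
    (∀ k, k < pvAdvance ms bound p → k < ms.length → ms.getD k 0 < bound) ∧
    (pvAdvance ms bound p < ms.length → ¬ ms.getD (pvAdvance ms bound p) 0 < bound) :=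
  pv_advance_aux ms bound ms.length p (by omega) hp

theorem pv_hit (window : Int) (ms : List Int) (hs : ms.Pairwise (· ≤ ·)) (s : Int) (q : Nat)
    (hq1 : ∀ k, k < q → k < ms.length → ms.getD k 0 < s - window)
    (hq2 : q < ms.length → ¬ ms.getD q 0 < s - window) :
    (decide (q < ms.length) && decide (ms.getD q 0 ≤ s + window))
      = ms.any (fun m => decide (s - window ≤ m) && decide (m ≤ s + window)) := by
  by_cases hql : q < ms.length
  · rw [List.getD_eq_getElem ms 0 hql] at hq2 ⊢
    by_cases hle : ms[q] ≤ s + window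
    · simp only [hql, hle, decide_true, Bool.and_true, decide_true]
      symm
      rw [List.any_eq_true]
      exact ⟨ms[q], List.getElem_mem hql, by simp [hle]; omega⟩
    · simp only [hle, decide_false, Bool.and_false]
      symm
      rw [List.any_eq_false]
      intro m hm
      rw [List.mem_iff_getElem] at hm
      obtain ⟨k, hk, rfl⟩ := hm
      simp only [Bool.and_eq_true, decide_eq_true_eq, not_and]
      intro hge
      by_cases hkq : k < q
      · exact absurd hge (by have := hq1 k hkq hk; rw [List.getD_eq_getElem ms 0 hk] at this; omega)
      · have hqk : q ≤ k := by omega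
        rcases Nat.lt_or_ge q k with h | h
        · have := (List.pairwise_iff_getElem.mp hs) q k hql hk h
          omega
        · have : q = k := by omega
          subst this; omega
  · simp only [hql, decide_false, Bool.false_and]
    symm
    rw [List.any_eq_false]
    intro m hm
    rw [List.mem_iff_getElem] at hm
    obtain ⟨k, hk, rfl⟩ := hm
    have := hq1 k (by omega) hk
    rw [List.getD_eq_getElem ms 0 hk] at this
    simp only [Bool.and_eq_true, decide_eq_true_eq, not_and]
    omega

theorem pv_sweepB (window : Int) (ms : List Int) (hs : ms.Pairwise (· ≤ ·)) :
    ∀ (ls : List String) (s : Int) (p₀ : Nat) (acc : List String),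
    (∀ k, k < p₀ → k < ms.length → ms.getD k 0 < s - window) →
    ((PySem.List.enumerate ls s).foldl (fun (st : Nat × List String) p =>
      if decide (pvAdvance ms (p.1 - window) st.1 < ms.length) && decide (ms.getD (pvAdvance ms (p.1 - window) st.1) 0 ≤ p.1 + window) then
        (pvAdvance ms (p.1 - window) st.1, st.2 ++ [p.2])
      else (pvAdvance ms (p.1 - window) st.1, st.2)) (p₀, acc)).2
    = acc ++ ((PySem.List.enumerate ls s).filter
        (fun p => ms.any (fun m => decide (p.1 - window ≤ m) && decide (m ≤ p.1 + window)))).map (fun p => p.2) := by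
  intro ls
  induction ls with
  | nil => intro s p₀ acc hinv; simp [PySem.List.enumerate_nil]
  | cons x xs ih =>
    intro s p₀ acc hinv
    rw [PySem.List.enumerate_cons, List.foldl_cons, List.filter_cons]
    obtain ⟨ha1, ha2, ha3⟩ := pv_advance_spec ms (s - window) p₀ hinv
    have hcond := pv_hit window ms hs s (pvAdvance ms (s - window) p₀) ha2 ha3
    have hinv' : ∀ k, k < pvAdvance ms ((s, x).1 - window) p₀ → k < ms.length →
        ms.getD k 0 < (s + 1) - window := by
      intro k hk hkl
      have := ha2 k hk hkl
      omega
    simp only []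
    rw [show ((s, x).1 : Int) = s from rfl] at *
    by_cases hc : (decide (pvAdvance ms (s - window) p₀ < ms.length) &&
        decide (ms.getD (pvAdvance ms (s - window) p₀) 0 ≤ s + window)) = true
    · rw [if_pos hc, ← hcond, if_pos hc]
      rw [ih (s+1) _ _ hinv']
      simp
    · rw [if_neg hc, ← hcond, if_neg hc]
      exact ih (s+1) _ _ hinv'

theorem pv_any_ms (w : Int) (n : Nat) (f : String → Bool) (L : List (Int × String)) (j : Nat) (hj : j < n) :
    L.any (fun p => f p.2 &&
      (decide (max 0 (p.1 - w) ≤ (j : Int)) && decide ((j : Int) < min (n : Int) (p.1 + w + 1)) && decide (j < n)))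
    = ((L.filter (fun p => f p.2)).map (fun p => p.1)).any
        (fun m => decide ((j : Int) - w ≤ m) && decide (m ≤ (j : Int) + w)) := by
  rw [List.any_map, List.any_filter, Bool.eq_iff_iff]
  simp only [Function.comp, List.any_eq_true, Bool.and_eq_true, decide_eq_true_eq]
  constructor
  · rintro ⟨p, hp, hf, ⟨h1, h2⟩, h3⟩
    exact ⟨p, hp, hf, by omega, by omega⟩
  · rintro ⟨p, hp, hf, h1, h2⟩
    exact ⟨p, hp, hf, ⟨by omega, by omega⟩, hj⟩

theorem pv_kept_eq (w : Int) (toks lines : List String) :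
    List.map (fun lk => lk.1) (List.filter (fun lk => lk.2)
      (lines.zip (List.foldl (fun keep p =>
        if (toks.any fun t => PySem.Str.isIn t (PySem.Str.lower p.2)) = true then
          List.foldl (fun ks j => ks.set j.toNat true) keep
            (PySem.List.pyRange (max 0 (p.1 - w)) (min ((lines.length : Int)) (p.1 + w + 1)) 1)
        else keep) (List.replicate lines.length false) (PySem.List.enumerate lines 0))))
    = (List.foldl (fun (st : Nat × List String) p =>
        if (decide (pvAdvance (List.map (fun p => p.1) (List.filter (fun p => toks.any fun t => PySem.Str.isIn t (PySem.Str.lower p.2)) (PySem.List.enumerate lines 0))) (p.1 - w) st.1 < (List.map (fun p => p.1) (List.filter (fun p => toks.any fun t => PySem.Str.isIn t (PySem.Str.lower p.2)) (PySem.List.enumerate lines 0))).length) &&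
            decide ((List.map (fun p => p.1) (List.filter (fun p => toks.any fun t => PySem.Str.isIn t (PySem.Str.lower p.2)) (PySem.List.enumerate lines 0))).getD (pvAdvance (List.map (fun p => p.1) (List.filter (fun p => toks.any fun t => PySem.Str.isIn t (PySem.Str.lower p.2)) (PySem.List.enumerate lines 0))) (p.1 - w) st.1) 0 ≤ p.1 + w)) = true then
          (pvAdvance (List.map (fun p => p.1) (List.filter (fun p => toks.any fun t => PySem.Str.isIn t (PySem.Str.lower p.2)) (PySem.List.enumerate lines 0))) (p.1 - w) st.1, st.2 ++ [p.2])
        else (pvAdvance (List.map (fun p => p.1) (List.filter (fun p => toks.any fun t => PySem.Str.isIn t (PySem.Str.lower p.2)) (PySem.List.enumerate lines 0))) (p.1 - w) st.1, st.2)) (0, []) (PySem.List.enumerate lines 0)).2 := by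
  have hsort : (List.map (fun p => p.1) (List.filter (fun p => toks.any fun t => PySem.Str.isIn t (PySem.Str.lower p.2)) (PySem.List.enumerate lines 0))).Pairwise (· ≤ ·) := by
    rw [List.pairwise_map]
    apply List.Pairwise.imp (fun h => le_of_lt h)
    exact List.Pairwise.sublist List.filter_sublist (PySem.List.pairwise_lt_enumerate lines 0)
  rw [pv_sweepB w (List.map (fun p => p.1) (List.filter (fun p => toks.any fun t => PySem.Str.isIn t (PySem.Str.lower p.2)) (PySem.List.enumerate lines 0))) hsort lines 0 0 [] (by intro k hk; omega)]
  obtain ⟨hKlen, hKget⟩ := pv_keepA w (lines.length : Int)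
      (fun str => toks.any fun t => PySem.Str.isIn t (PySem.Str.lower str))
      (PySem.List.enumerate lines 0) (List.replicate lines.length false)
  rw [pv_zip_bridge lines (List.foldl (fun keep p =>
        if (toks.any fun t => PySem.Str.isIn t (PySem.Str.lower p.2)) = true then
          List.foldl (fun ks j => ks.set j.toNat true) keep
            (PySem.List.pyRange (max 0 (p.1 - w)) (min ((lines.length : Int)) (p.1 + w + 1)) 1)
        else keep) (List.replicate lines.length false) (PySem.List.enumerate lines 0)) 0 (by rw [hKlen]; simp)]
  rw [List.nil_append]
  have hfc : List.filter (fun p => (List.foldl (fun keep p =>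
        if (toks.any fun t => PySem.Str.isIn t (PySem.Str.lower p.2)) = true then
          List.foldl (fun ks j => ks.set j.toNat true) keep
            (PySem.List.pyRange (max 0 (p.1 - w)) (min ((lines.length : Int)) (p.1 + w + 1)) 1)
        else keep) (List.replicate lines.length false) (PySem.List.enumerate lines 0)).getD (p.1 - 0).toNat false) (PySem.List.enumerate lines 0)
      = List.filter (fun p => (List.map (fun p => p.1) (List.filter (fun p => toks.any fun t => PySem.Str.isIn t (PySem.Str.lower p.2)) (PySem.List.enumerate lines 0))).any fun m => decide (p.1 - w ≤ m) && decide (m ≤ p.1 + w)) (PySem.List.enumerate lines 0) := by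
    apply List.filter_congr
    intro p hp
    rw [PySem.List.mem_enumerate_iff] at hp
    obtain ⟨j, hj, rfl⟩ := hp
    simp only [zero_add]
    have h1 : (((j : Int), lines[j]).1 - 0).toNat = j := by simp
    have hrep : (List.replicate lines.length false).getD j false = false := by
      rw [List.getD_eq_getElem?_getD, List.getElem?_replicate]
      split <;> rfl
    rw [h1, hKget j, hrep, Bool.false_or, List.length_replicate]
    exact pv_any_ms w lines.length (fun str => toks.any fun t => PySem.Str.isIn t (PySem.Str.lower str))
      (PySem.List.enumerate lines 0) j hj
  rw [hfc]

theorem main_eq (t qy : String) (w : Int) :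
    keyword_prefilter t qy w = keyword_prefilter_alt t qy w := by
  simp only [keyword_prefilter, keyword_prefilter_alt]
  set lines := PySem.Str.splitlines t with hlines
  set toks := (PySem.Str.split₀ (PySem.Str.lower qy)).filter (fun t => 2 < PySem.Str.len t) with htoks
  by_cases h0 : toks = [] ∨ lines = []
  · rw [if_pos h0, if_pos h0]
  · rw [if_neg h0, if_neg h0]
    rw [pv_kept_eq w toks lines]

-- ===== VERDICT (by name: the statement is the Claim_ definition above) =====
theorem keyword_prefilter_spec : Claim_equal_keyword_prefilter := by
  intro transcript query window _
  exact main_eq transcript query window
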